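-- pv_equiv track=rewrite | github.com/mika-okamoto/wordle | wordle.py | genFrequency
-- ===== SOURCE A (Python) =====
-- def genFrequency(wordlist):
--     freq = {}
--     for word in wordlist:
--         lets = []
--         for letter in word:
--             if letter not in freq:
--                 freq[letter] = 1
--             elif letter in lets:
--                 freq[letter] += 0.25
--             else:
--                 freq[letter] += 1
--             lets.append(letter)
--
--     return list(dict(sorted(freq.items(), key=lambda item: item[1])).keys())[::-1]
-- ===== SOURCE B (Python) =====
-- from collections import Counter
--
-- def genFrequency(wordlist):
--     freq = {}
--     for word in wordlist:
--         for letter, c in Counter(word).items():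
--             freq[letter] = freq.get(letter, 0) + 1 + 0.25 * (c - 1)
--     return list(dict(sorted(freq.items(), key=lambda item: item[1])).keys())[::-1]
-- ===== Notes on version B (the rewrite author's own statement) =====
-- stated objective: idiomatic
-- what changed: B replaces A's per-word seen-list and three-way branch per character by a per-word Counter whose (letter, count) items each contribute 1 + 0.25*(count-1) to the frequency dict in one step, keeping the identical final sort-and-reverse line.
import Mathlib
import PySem

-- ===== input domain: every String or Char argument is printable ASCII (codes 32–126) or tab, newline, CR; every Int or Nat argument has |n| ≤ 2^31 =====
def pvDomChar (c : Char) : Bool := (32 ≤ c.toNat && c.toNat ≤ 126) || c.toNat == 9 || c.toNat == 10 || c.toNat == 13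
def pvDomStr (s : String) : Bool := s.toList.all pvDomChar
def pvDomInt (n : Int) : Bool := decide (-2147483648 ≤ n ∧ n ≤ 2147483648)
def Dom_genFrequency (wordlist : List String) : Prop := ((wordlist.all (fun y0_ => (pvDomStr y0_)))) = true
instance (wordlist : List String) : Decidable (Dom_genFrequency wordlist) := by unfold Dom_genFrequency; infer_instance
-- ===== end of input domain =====

-- B replaces A's per-word seen-list and three-way branch per character by a per-word Counter
-- whose (letter, count) items each contribute 1 + 0.25*(count-1) in one step (idiomatic decomposition).
-- Frequencies (Python floats, always integer multiples of 0.25) are represented EXACTLY as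
-- Int quarter-units (value × 4): 1 ↦ 4, 0.25 ↦ 1; sort-key order and equality are preserved.
-- Iterating a Python str yields 1-character strings, ported as String.ofList [ch].

-- ===== PORT A =====
def genFreqStepA (st : PySem.Dict String Int × List String) (letter : String) :
    PySem.Dict String Int × List String :=
  let freq := st.1
  let lets := st.2
  let freq' :=
    if freq.contains letter = false then freq.insert letter 4                       -- freq[letter] = 1
    else if lets.contains letter then freq.insert letter (freq.getD letter 0 + 1)   -- freq[letter] += 0.25
    else freq.insert letter (freq.getD letter 0 + 4)                                -- freq[letter] += 1
  (freq', lets ++ [letter])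

def genFrequency (wordlist : List String) : List String :=
  let freq := wordlist.foldl
    (fun freq word =>
      ((word.toList.map (fun ch => String.ofList [ch])).foldl genFreqStepA (freq, ([] : List String))).1)
    PySem.Dict.empty
  (PySem.Dict.ofList (PySem.List.sorted freq.items (fun item => item.2) false)).keys.reverse

-- ===== PORT B =====
def genFrequency_alt (wordlist : List String) : List String :=
  let freq := wordlist.foldl
    (fun freq word =>
      (PySem.Dict.counter (word.toList.map (fun ch => String.ofList [ch]))).items.foldl
        (fun freq p => freq.insert p.1 (freq.getD p.1 0 + 4 + (p.2 - 1))) freq)   -- freq.get(l,0) + 1 + 0.25*(c-1)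
    PySem.Dict.empty
  (PySem.Dict.ofList (PySem.List.sorted freq.items (fun item => item.2) false)).keys.reverse

-- ===== PRECONDITION & SPEC =====
def Spec_genFrequency (wordlist : List String) (out : List String) : Prop := out = genFrequency_alt wordlist
instance (wordlist : List String) (out : List String) : Decidable (Spec_genFrequency wordlist out) := by unfold Spec_genFrequency; infer_instance

-- ===== CLAIM (what is proved, stated in full; the proofs are below) =====
def Claim_equal_genFrequency : Prop := ∀ (wordlist : List String), Dom_genFrequency wordlist → Spec_genFrequency wordlist (genFrequency wordlist)

-- ===== LEMMAS AND PROOFS =====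

-- B's inner fold, named for the proofs
def pvF (d : PySem.Dict String Int) (l : List (String × Int)) : PySem.Dict String Int :=
  l.foldl (fun d p => d.insert p.1 (d.getD p.1 0 + 4 + (p.2 - 1))) d

-- the (letter, count) items Counter produces for a letter list
def pvPairs (l : List String) : List (String × Int) :=
  (PySem.Set.ofList l).map (fun k => (k, (l.count k : Int)))

theorem pvF_cons (d : PySem.Dict String Int) (q : String × Int) (t : List (String × Int)) :
    pvF d (q :: t) = pvF (d.insert q.1 (d.getD q.1 0 + 4 + (q.2 - 1))) t := rfl

theorem pvPairs_fst (l : List String) : (pvPairs l).map Prod.fst = PySem.Set.ofList l := by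
  simp [pvPairs, Function.comp_def]

theorem pvF_getD_not_mem (l : List (String × Int)) (c : String) (h : c ∉ l.map Prod.fst)
    (d : PySem.Dict String Int) : (pvF d l).getD c 0 = d.getD c 0 := by
  induction l generalizing d with
  | nil => rfl
  | cons p t ih =>
      simp only [List.map_cons, List.mem_cons, not_or] at h
      simp only [pvF, List.foldl_cons] at *
      rw [ih h.2, PySem.Dict.getD_insert_of_ne d _ _ h.1]

theorem pvF_contains (l : List (String × Int)) (c : String) (d : PySem.Dict String Int) :
    (pvF d l).contains c = (d.contains c || decide (c ∈ l.map Prod.fst)) := by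
  induction l generalizing d with
  | nil => simp [pvF]
  | cons p t ih =>
      simp only [pvF, List.foldl_cons] at *
      rw [ih, PySem.Dict.contains_insert]
      by_cases h1 : c = p.1
      · simp [h1, List.mem_cons]
      · have h2 : decide (c ∈ p.1 :: List.map Prod.fst t) = decide (c ∈ List.map Prod.fst t) :=
          decide_eq_decide.mpr (by simp [h1])
        rw [show (c == p.1) = false by simp [h1], List.map_cons, h2]
        simp

theorem pv_ins_comm (d : PySem.Dict String Int) (c k : String) (v w : Int)
    (hck : k ≠ c) (hc : d.contains c = true) :
    (d.insert k w).insert c v = (d.insert c v).insert k w := by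
  apply PySem.Dict.ext
  by_cases hk : d.contains k = true
  · have h1 : (d.insert k w).contains c = true := by
      rw [PySem.Dict.contains_insert]; simp [hc]
    have h2 : (d.insert c v).contains k = true := by
      rw [PySem.Dict.contains_insert]; simp [hk]
    rw [PySem.Dict.items_insert_of_contains _ _ h1, PySem.Dict.items_insert_of_contains _ _ hk,
        PySem.Dict.items_insert_of_contains _ _ h2, PySem.Dict.items_insert_of_contains _ _ hc]
    simp only [List.map_map]
    apply List.map_congr_left
    intro q hq
    by_cases e1 : q.1 = k <;> by_cases e2 : q.1 = c <;>
      simp [e1, e2, hck, Ne.symm hck]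
  · have hk' : d.contains k = false := by simpa using hk
    have h1 : (d.insert k w).contains c = true := by
      rw [PySem.Dict.contains_insert]; simp [hc]
    have h2 : (d.insert c v).contains k = false := by
      rw [PySem.Dict.contains_insert]; simp [hk', hck]
    rw [PySem.Dict.items_insert_of_contains _ _ h1, PySem.Dict.items_insert_of_not_contains _ _ hk',
        PySem.Dict.items_insert_of_not_contains _ _ h2, PySem.Dict.items_insert_of_contains _ _ hc]
    simp [hck]

theorem pvF_insert_comm (l : List (String × Int)) (c : String) (v : Int)
    (h : c ∉ l.map Prod.fst) (d : PySem.Dict String Int) (hc : d.contains c = true) :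
    (pvF d l).insert c v = pvF (d.insert c v) l := by
  induction l generalizing d with
  | nil => rfl
  | cons p t ih =>
      simp only [List.map_cons, List.mem_cons, not_or] at h
      simp only [pvF, List.foldl_cons] at *
      rw [PySem.Dict.getD_insert_of_ne d _ _ (Ne.symm h.1),
          ← pv_ins_comm d c p.1 v _ (Ne.symm h.1) hc,
          ih h.2 _ (by rw [PySem.Dict.contains_insert]; simp [hc])]

theorem pvF_bump (l : List (String × Int)) (hnd : (l.map Prod.fst).Nodup) (c : String)
    (hc : c ∈ l.map Prod.fst) (d : PySem.Dict String Int) :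
    pvF d (l.map (fun p => (p.1, p.2 + if p.1 = c then 1 else 0)))
      = (pvF d l).insert c ((pvF d l).getD c 0 + 1) := by
  induction l generalizing d with
  | nil => simp at hc
  | cons p t ih =>
      simp only [List.map_cons, List.nodup_cons] at hnd
      by_cases e : p.1 = c
      · have hct : c ∉ t.map Prod.fst := e ▸ hnd.1
        have hmap : t.map (fun q => (q.1, q.2 + if q.1 = c then 1 else 0)) = t := by
          rw [show t = t.map id from (List.map_id t).symm]
          simp only [List.map_map]
          apply List.map_congr_left
          intro q hq
          have hqc : q.1 ≠ c := fun e' => hct (List.mem_map.mpr ⟨q, hq, e'⟩)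
          simp [hqc]
        rw [List.map_cons, hmap, pvF_cons, pvF_cons, if_pos e]
        simp only [e]
        have harith : d.getD c 0 + 4 + (p.2 + 1 - 1) = d.getD c 0 + 4 + (p.2 - 1) + 1 := by ring
        rw [harith]
        have hV : (pvF (d.insert c (d.getD c 0 + 4 + (p.2 - 1))) t).getD c 0
            = d.getD c 0 + 4 + (p.2 - 1) := by
          rw [pvF_getD_not_mem t c hct, PySem.Dict.getD_insert_self]
        rw [hV, pvF_insert_comm t c _ hct _ (by rw [PySem.Dict.contains_insert]; simp),
            PySem.Dict.insert_insert_self]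
      · have hct : c ∈ t.map Prod.fst := by
          rcases List.mem_cons.mp hc with h' | h'
          · exact absurd h'.symm e
          · exact h'
        rw [List.map_cons, pvF_cons, pvF_cons]
        simp only [if_neg e, add_zero]
        exact ih hnd.2 hct _

theorem pv_pairs_append_mem (p : List String) (c : String) (hcp : c ∈ p) :
    pvPairs (p ++ [c]) = (pvPairs p).map (fun q => (q.1, q.2 + if q.1 = c then 1 else 0)) := by
  unfold pvPairs
  rw [PySem.Set.ofList_append_singleton, PySem.Set.add_of_mem ((PySem.Set.mem_ofList _ _).mpr hcp)]
  simp only [List.map_map]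
  apply List.map_congr_left
  intro k _
  simp only [Function.comp_def, Prod.mk.injEq, true_and]
  rw [List.count_append]
  by_cases e : k = c
  · subst e
    simp
  · simp [List.count_singleton, e, show (c == k) = false by simp [Ne.symm e]]

theorem pv_pairs_append_not_mem (p : List String) (c : String) (hcp : c ∉ p) :
    pvPairs (p ++ [c]) = pvPairs p ++ [(c, 1)] := by
  unfold pvPairs
  rw [PySem.Set.ofList_append_singleton,
      PySem.Set.add_of_not_mem (fun h => hcp ((PySem.Set.mem_ofList _ _).mp h))]
  rw [List.map_append]
  congr 1
  · apply List.map_congr_left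
    intro k hk
    have hkc : k ≠ c := fun e => hcp (e ▸ (PySem.Set.mem_ofList _ _).mp hk)
    rw [List.count_append]
    simp [List.count_singleton, show (c == k) = false by simp [Ne.symm hkc]]
  · simp [List.count_append, List.count_singleton, List.count_eq_zero.mpr hcp]

theorem stepA_eq (freq : PySem.Dict String Int) (lets : List String) (c : String) :
    genFreqStepA (freq, lets) c =
      (if freq.contains c = false then freq.insert c 4
       else if lets.contains c then freq.insert c (freq.getD c 0 + 1)
       else freq.insert c (freq.getD c 0 + 4), lets ++ [c]) := rfl

theorem pv_step (p : List String) (c : String) (d : PySem.Dict String Int) :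
    genFreqStepA (pvF d (pvPairs p), p) c = (pvF d (pvPairs (p ++ [c])), p ++ [c]) := by
  rw [stepA_eq]
  simp only [Prod.mk.injEq, and_true]
  by_cases hcp : c ∈ p
  · -- repeated letter in this word: A takes the `+= 0.25` branch, B's count gets bumped
    have hnd : ((pvPairs p).map Prod.fst).Nodup := by
      rw [pvPairs_fst]; exact PySem.Set.nodup_ofList p
    have hmem : c ∈ (pvPairs p).map Prod.fst := by
      rw [pvPairs_fst]; exact (PySem.Set.mem_ofList _ _).mpr hcp
    have hcont : (pvF d (pvPairs p)).contains c = true := by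
      rw [pvF_contains]; simp [hmem]
    have hpc : p.contains c = true := List.contains_iff_mem.mpr hcp
    rw [if_neg (by simp [hcont]), if_pos hpc, pv_pairs_append_mem p c hcp,
        pvF_bump _ hnd c hmem d]
  · -- first occurrence in this word: both sides add a full point
    have h1 : ¬ p.contains c = true := fun h => hcp (List.contains_iff_mem.mp h)
    have hfold : pvF d (pvPairs p ++ [(c, 1)])
        = (pvF d (pvPairs p)).insert c ((pvF d (pvPairs p)).getD c 0 + 4 + (1 - 1)) := by
      unfold pvF
      rw [List.foldl_append]
      rfl
    rw [pv_pairs_append_not_mem p c hcp, hfold]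
    by_cases hcd : (pvF d (pvPairs p)).contains c = false
    · rw [if_pos hcd, PySem.Dict.getD_of_not_contains _ _ hcd]
      norm_num
    · rw [if_neg hcd, if_neg h1]
      norm_num

theorem pv_word (rest p : List String) (d : PySem.Dict String Int) :
    rest.foldl genFreqStepA (pvF d (pvPairs p), p) = (pvF d (pvPairs (p ++ rest)), p ++ rest) := by
  induction rest generalizing p with
  | nil => simp
  | cons c t ih =>
      rw [List.foldl_cons, pv_step]
      have := ih (p ++ [c])
      simpa using this

theorem pv_wordstep (d : PySem.Dict String Int) (word : String) :
    ((word.toList.map (fun ch => String.ofList [ch])).foldl genFreqStepA (d, ([] : List String))).1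
      = (PySem.Dict.counter (word.toList.map (fun ch => String.ofList [ch]))).items.foldl
          (fun freq p => freq.insert p.1 (freq.getD p.1 0 + 4 + (p.2 - 1))) d := by
  have h := pv_word (word.toList.map (fun ch => String.ofList [ch])) [] d
  have h0 : pvF d (pvPairs []) = d := rfl
  rw [h0] at h
  simp only [List.nil_append] at h
  rw [h]
  rw [PySem.Dict.items_counter]
  rfl

-- ===== VERDICT (by name: the statement is the Claim_ definition above) =====
theorem genFrequency_spec : Claim_equal_genFrequency := by
  intro wl _
  show genFrequency wl = genFrequency_alt wl
  have h : (fun (freq : PySem.Dict String Int) (word : String) =>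
        ((word.toList.map (fun ch => String.ofList [ch])).foldl genFreqStepA (freq, ([] : List String))).1)
      = (fun (freq : PySem.Dict String Int) (word : String) =>
        (PySem.Dict.counter (word.toList.map (fun ch => String.ofList [ch]))).items.foldl
          (fun freq p => freq.insert p.1 (freq.getD p.1 0 + 4 + (p.2 - 1))) freq) :=
    funext fun d => funext fun w => pv_wordstep d w
  simp only [genFrequency, genFrequency_alt, h]
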